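-- pv_equiv track=rewrite | github.com/vlad180520/HackItAll2025_SAP | backend/solution/strategies/genetic/demand_analyzer.py | _calculate_stockout_hours
-- ===== SOURCE A (Python) =====
-- from typing import Dict, List, Tuple, Optional
--
-- def _calculate_stockout_hours(
--     departures: List[Dict],
--     initial_stock: Dict[str, int]
-- ) -> Dict[str, Optional[int]]:
--     """Calculate when each class runs out of stock."""
--     stockout = {}
--     cumulative = {"FIRST": 0, "BUSINESS": 0, "PREMIUM_ECONOMY": 0, "ECONOMY": 0}
--
--     for class_type in cumulative:
--         stockout[class_type] = None  # No stockout by default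
--
--     for flight in departures:
--         for class_type in cumulative:
--             cumulative[class_type] += flight.get(class_type, 0)
--
--             if stockout[class_type] is None:
--                 if cumulative[class_type] > initial_stock.get(class_type, 0):
--                     stockout[class_type] = flight['dep_hours']
--
--     return stockout
-- ===== SOURCE B (Python) =====
-- def _calculate_stockout_hours(departures, initial_stock):
--     """Per-class countdown: scan departures once per class, decrementing the
--     remaining stock, and stop at the first flight that drives it negative."""
--     def first_stockout(class_type):
--         remaining = initial_stock.get(class_type, 0)
--         for flight in departures:
--             remaining -= flight.get(class_type, 0)
--             if remaining < 0:
--                 return flight['dep_hours']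
--         return None
--     return {c: first_stockout(c)
--             for c in ("FIRST", "BUSINESS", "PREMIUM_ECONOMY", "ECONOMY")}
-- ===== Notes on version B (the rewrite author's own statement) =====
-- stated objective: alternative
-- what changed: A makes one simultaneous pass over departures updating accumulator and stockout dicts for all four classes in an inner loop; B instead runs four independent per-class scans that count the remaining stock DOWN and return (break) at the first flight driving it negative.
import Mathlib
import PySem

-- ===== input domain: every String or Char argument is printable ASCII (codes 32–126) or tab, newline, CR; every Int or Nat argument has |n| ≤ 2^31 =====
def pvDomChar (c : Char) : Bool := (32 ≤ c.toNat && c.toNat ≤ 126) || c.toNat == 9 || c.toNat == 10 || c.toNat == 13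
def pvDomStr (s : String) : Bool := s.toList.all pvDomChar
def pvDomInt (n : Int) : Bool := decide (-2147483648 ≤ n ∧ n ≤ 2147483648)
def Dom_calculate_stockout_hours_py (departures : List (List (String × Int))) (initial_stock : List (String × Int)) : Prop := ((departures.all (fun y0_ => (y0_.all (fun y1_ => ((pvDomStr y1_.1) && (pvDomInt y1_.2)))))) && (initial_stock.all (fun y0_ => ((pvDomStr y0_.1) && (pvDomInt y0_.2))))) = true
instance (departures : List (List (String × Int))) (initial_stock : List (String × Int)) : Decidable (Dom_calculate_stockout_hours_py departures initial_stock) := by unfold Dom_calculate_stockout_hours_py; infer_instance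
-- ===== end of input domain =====

-- B replaces A's single simultaneous pass (one accumulator dict, one stockout dict, inner
-- loop over the four classes) with four independent per-class scans that count the remaining
-- stock DOWN and return at the first flight driving it negative; same cost, different decomposition.

-- `d.get(k, 0)` on an association list (first match wins)
def pvGet (d : List (String × Int)) (k : String) : Int := (d.lookup k).getD 0

def pvClasses : List String := ["FIRST", "BUSINESS", "PREMIUM_ECONOMY", "ECONOMY"]

-- ===== PORT A =====
-- state: (cumulative, stockout); inner loop over the keys of cumulative, in order.
-- Under Pre_ the crossing flight always has a "dep_hours" key, so `pvGet flight "dep_hours"`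
-- is exactly Python's `flight['dep_hours']` there (outside Pre_ the Python raises KeyError).
def pvStepA (initial_stock : List (String × Int)) (flight : List (String × Int))
    (st : PySem.Dict String Int × PySem.Dict String (Option Int)) :
    PySem.Dict String Int × PySem.Dict String (Option Int) :=
  st.1.keys.foldl (fun st2 c =>
    let cum := st2.1.insert c (st2.1.getD c 0 + pvGet flight c)
    let so := if st2.2.getD c none = none then
                (if cum.getD c 0 > pvGet initial_stock c then
                   st2.2.insert c (some (pvGet flight "dep_hours"))
                 else st2.2)
              else st2.2
    (cum, so)) st

def calculate_stockout_hours_py (departures : List (List (String × Int))) (initial_stock : List (String × Int)) : List (String × Option Int) :=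
  let cumulative : PySem.Dict String Int :=
    PySem.Dict.mk [("FIRST", 0), ("BUSINESS", 0), ("PREMIUM_ECONOMY", 0), ("ECONOMY", 0)]
  let stockout : PySem.Dict String (Option Int) :=
    cumulative.keys.foldl (fun d c => d.insert c none) PySem.Dict.empty
  (departures.foldl (fun st flight => pvStepA initial_stock flight st) (cumulative, stockout)).2.items

-- ===== PORT B =====
-- one scan per class, counting the remaining stock down; stops at the first negative.
def pvScanClass (c : String) : List (List (String × Int)) → Int → Option Int
  | [], _ => none
  | f :: rest, remaining =>
    let r := remaining - pvGet f c
    if r < 0 then some (pvGet f "dep_hours") else pvScanClass c rest r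

def calculate_stockout_hours_py_alt (departures : List (List (String × Int))) (initial_stock : List (String × Int)) : List (String × Option Int) :=
  pvClasses.map (fun c => (c, pvScanClass c departures (pvGet initial_stock c)))

-- ===== PRECONDITION & SPEC =====
-- Pre_ excludes exactly the inputs on which Python A raises KeyError: some class first
-- exceeds its stock at a flight that has no 'dep_hours' key (B raises there too).
def Pre_calculate_stockout_hours_py (departures : List (List (String × Int))) (initial_stock : List (String × Int)) : Prop :=
  ∀ c ∈ pvClasses, ∀ i ∈ List.range departures.length,
    ((∀ j ∈ List.range i, ((departures.take (j+1)).map (fun f => pvGet f c)).sum ≤ pvGet initial_stock c) ∧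
     ((departures.take (i+1)).map (fun f => pvGet f c)).sum > pvGet initial_stock c) →
    ((departures.getD i []).lookup "dep_hours").isSome = true

instance (departures : List (List (String × Int))) (initial_stock : List (String × Int)) : Decidable (Pre_calculate_stockout_hours_py departures initial_stock) := by unfold Pre_calculate_stockout_hours_py; infer_instance

def pvWitness_calculate_stockout_hours_py : (List (List (String × Int))) × (List (String × Int)) :=
  ([[("ECONOMY", 3), ("dep_hours", 5)]], [("ECONOMY", 1)])

def Spec_calculate_stockout_hours_py (departures : List (List (String × Int))) (initial_stock : List (String × Int)) (out : List (String × Option Int)) : Prop := out = calculate_stockout_hours_py_alt departures initial_stock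
instance (departures : List (List (String × Int))) (initial_stock : List (String × Int)) (out : List (String × Option Int)) : Decidable (Spec_calculate_stockout_hours_py departures initial_stock out) := by unfold Spec_calculate_stockout_hours_py; infer_instance

-- ===== CLAIM (what is proved, stated in full; the proofs are below) =====
def Claim_equal_calculate_stockout_hours_py : Prop := ∀ (departures : List (List (String × Int))) (initial_stock : List (String × Int)), Dom_calculate_stockout_hours_py departures initial_stock → Pre_calculate_stockout_hours_py departures initial_stock → Spec_calculate_stockout_hours_py departures initial_stock (calculate_stockout_hours_py departures initial_stock)

-- ===== LEMMAS AND PROOFS =====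

-- A's count-up scan for a single class (what A's pass computes for class c when its
-- stockout entry is still `none` and its accumulator is `acc`).
def pvScanUp (c : String) (stock : Int) : List (List (String × Int)) → Int → Option Int
  | [], _ => none
  | f :: rest, acc =>
    let t := acc + pvGet f c
    if t > stock then some (pvGet f "dep_hours") else pvScanUp c stock rest t

-- per-class meaning of A's state
def pvComb (c : String) (stock : Int) (s : Option Int) (acc : Int)
    (flights : List (List (String × Int))) : Option Int :=
  match s with
  | some v => some v
  | none => pvScanUp c stock flights acc

def pvMkC (a b p e : Int) : PySem.Dict String Int :=
  PySem.Dict.mk [("FIRST", a), ("BUSINESS", b), ("PREMIUM_ECONOMY", p), ("ECONOMY", e)]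

def pvMkS (a b p e : Option Int) : PySem.Dict String (Option Int) :=
  PySem.Dict.mk [("FIRST", a), ("BUSINESS", b), ("PREMIUM_ECONOMY", p), ("ECONOMY", e)]

theorem pvIteGetD {ν : Type} (c : Prop) [Decidable c] (d₁ d₂ : PySem.Dict String ν) (k : String) (v : ν) :
    PySem.Dict.getD (if c then d₁ else d₂) k v = if c then d₁.getD k v else d₂.getD k v := by
  split_ifs <;> rfl

theorem pvIteInsert {ν : Type} (c : Prop) [Decidable c] (d₁ d₂ : PySem.Dict String ν) (k : String) (v : ν) :
    PySem.Dict.insert (if c then d₁ else d₂) k v = if c then d₁.insert k v else d₂.insert k v := by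
  split_ifs <;> rfl

theorem pvMkC_keys (a b p e : Int) :
    (pvMkC a b p e).keys = ["FIRST", "BUSINESS", "PREMIUM_ECONOMY", "ECONOMY"] := rfl

theorem pvMkC_getD_F (a b p e : Int) : (pvMkC a b p e).getD "FIRST" 0 = a := rfl
theorem pvMkC_getD_B (a b p e : Int) : (pvMkC a b p e).getD "BUSINESS" 0 = b := rfl
theorem pvMkC_getD_P (a b p e : Int) : (pvMkC a b p e).getD "PREMIUM_ECONOMY" 0 = p := rfl
theorem pvMkC_getD_E (a b p e : Int) : (pvMkC a b p e).getD "ECONOMY" 0 = e := rfl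
theorem pvMkC_ins_F (a b p e v : Int) : (pvMkC a b p e).insert "FIRST" v = pvMkC v b p e := rfl
theorem pvMkC_ins_B (a b p e v : Int) : (pvMkC a b p e).insert "BUSINESS" v = pvMkC a v p e := rfl
theorem pvMkC_ins_P (a b p e v : Int) : (pvMkC a b p e).insert "PREMIUM_ECONOMY" v = pvMkC a b v e := rfl
theorem pvMkC_ins_E (a b p e v : Int) : (pvMkC a b p e).insert "ECONOMY" v = pvMkC a b p v := rfl
theorem pvMkS_getD_F (a b p e : Option Int) : (pvMkS a b p e).getD "FIRST" none = a := rfl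
theorem pvMkS_getD_B (a b p e : Option Int) : (pvMkS a b p e).getD "BUSINESS" none = b := rfl
theorem pvMkS_getD_P (a b p e : Option Int) : (pvMkS a b p e).getD "PREMIUM_ECONOMY" none = p := rfl
theorem pvMkS_getD_E (a b p e : Option Int) : (pvMkS a b p e).getD "ECONOMY" none = e := rfl
theorem pvMkS_ins_F (a b p e v : Option Int) : (pvMkS a b p e).insert "FIRST" v = pvMkS v b p e := rfl
theorem pvMkS_ins_B (a b p e v : Option Int) : (pvMkS a b p e).insert "BUSINESS" v = pvMkS a v p e := rfl
theorem pvMkS_ins_P (a b p e v : Option Int) : (pvMkS a b p e).insert "PREMIUM_ECONOMY" v = pvMkS a b v e := rfl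
theorem pvMkS_ins_E (a b p e v : Option Int) : (pvMkS a b p e).insert "ECONOMY" v = pvMkS a b p v := rfl

set_option maxHeartbeats 2000000 in
theorem pvStepA_shape (ist f : List (String × Int)) (a b p e : Int) (sa sb sp se : Option Int) :
    pvStepA ist f (pvMkC a b p e, pvMkS sa sb sp se) =
      (pvMkC (a + pvGet f "FIRST") (b + pvGet f "BUSINESS")
             (p + pvGet f "PREMIUM_ECONOMY") (e + pvGet f "ECONOMY"),
       pvMkS (if sa = none then (if a + pvGet f "FIRST" > pvGet ist "FIRST" then some (pvGet f "dep_hours") else sa) else sa)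
             (if sb = none then (if b + pvGet f "BUSINESS" > pvGet ist "BUSINESS" then some (pvGet f "dep_hours") else sb) else sb)
             (if sp = none then (if p + pvGet f "PREMIUM_ECONOMY" > pvGet ist "PREMIUM_ECONOMY" then some (pvGet f "dep_hours") else sp) else sp)
             (if se = none then (if e + pvGet f "ECONOMY" > pvGet ist "ECONOMY" then some (pvGet f "dep_hours") else se) else se)) := by
  simp only [pvStepA, pvMkC_keys, List.foldl,
    pvMkC_getD_F, pvMkC_getD_B, pvMkC_getD_P, pvMkC_getD_E,
    pvMkC_ins_F, pvMkC_ins_B, pvMkC_ins_P, pvMkC_ins_E,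
    pvIteGetD, pvIteInsert,
    pvMkS_getD_F, pvMkS_getD_B, pvMkS_getD_P, pvMkS_getD_E,
    pvMkS_ins_F, pvMkS_ins_B, pvMkS_ins_P, pvMkS_ins_E, ite_self]
  split_ifs <;> rfl

-- one flight step, per class
theorem pvComb_step (c : String) (stock : Int) (s : Option Int) (acc : Int)
    (f : List (String × Int)) (rest : List (List (String × Int))) :
    pvComb c stock
      (if s = none then (if acc + pvGet f c > stock then some (pvGet f "dep_hours") else s) else s)
      (acc + pvGet f c) rest = pvComb c stock s acc (f :: rest) := by
  cases s with
  | some v => simp [pvComb]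
  | none => by_cases h : acc + pvGet f c > stock <;> simp [pvComb, pvScanUp, h]

theorem pvLoopA (ist : List (String × Int)) (flights : List (List (String × Int)))
    (a b p e : Int) (sa sb sp se : Option Int) :
    (flights.foldl (fun st flight => pvStepA ist flight st) (pvMkC a b p e, pvMkS sa sb sp se)).2.items =
      [("FIRST", pvComb "FIRST" (pvGet ist "FIRST") sa a flights),
       ("BUSINESS", pvComb "BUSINESS" (pvGet ist "BUSINESS") sb b flights),
       ("PREMIUM_ECONOMY", pvComb "PREMIUM_ECONOMY" (pvGet ist "PREMIUM_ECONOMY") sp p flights),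
       ("ECONOMY", pvComb "ECONOMY" (pvGet ist "ECONOMY") se e flights)] := by
  induction flights generalizing a b p e sa sb sp se with
  | nil => cases sa <;> cases sb <;> cases sp <;> cases se <;> rfl
  | cons f rest ih =>
    rw [List.foldl_cons, pvStepA_shape, ih]
    simp only [pvComb_step]

theorem pvScanUp_eq_scanClass (c : String) (stock : Int) (flights : List (List (String × Int))) (acc : Int) :
    pvScanUp c stock flights acc = pvScanClass c flights (stock - acc) := by
  induction flights generalizing acc with
  | nil => simp [pvScanUp, pvScanClass]
  | cons f rest ih =>
    simp only [pvScanUp, pvScanClass]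
    have : stock - acc - pvGet f c < 0 ↔ acc + pvGet f c > stock := by omega
    split_ifs with h1 h2 <;> first
      | rfl
      | (exact absurd (this.mpr h1) h2)
      | (exact absurd (this.mp h2) h1)
      | (rw [ih]; congr 1; omega)

-- ===== VERDICT (by name: the statement is the Claim_ definition above) =====
theorem calculate_stockout_hours_py_spec : Claim_equal_calculate_stockout_hours_py := by
  intro departures initial_stock _ _
  unfold Spec_calculate_stockout_hours_py calculate_stockout_hours_py calculate_stockout_hours_py_alt
  have h0 : (PySem.Dict.mk [("FIRST", (0:Int)), ("BUSINESS", 0), ("PREMIUM_ECONOMY", 0), ("ECONOMY", 0)]).keys.foldl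
      (fun (d : PySem.Dict String (Option Int)) c => d.insert c none) PySem.Dict.empty
      = pvMkS none none none none := by decide
  simp only [h0]
  have := pvLoopA initial_stock departures 0 0 0 0 none none none none
  rw [show (PySem.Dict.mk [("FIRST", (0:Int)), ("BUSINESS", 0), ("PREMIUM_ECONOMY", 0), ("ECONOMY", 0)]) = pvMkC 0 0 0 0 from rfl, this]
  simp [pvClasses, pvComb, pvScanUp_eq_scanClass]
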